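-- pv_equiv track=rewrite | github.com/Novavetwo/studies | medalhas_final_backup.py | soma_medalhas
-- ===== SOURCE A (Python) =====
-- def soma_medalhas(tabela: list[list[str]], categoria: str, pais: str, linha: int) -> int:
--     '''
--     Soma a quantidade de medalhas de uma determinada categoria a partir de uma tabela e
--     de um código de categoria, através de recursividade.
--     Requer que a entrada de linha seja len(tabela) - 1.
--     Exemplo:
--     >>> soma_medalhas([['','1','', '', 'BRA'], ['','1','', '', 'BRA']], '1', 'BRA', 1)
--     2
--     '''
--     if linha < 0:
--         soma = 0
--     else:
--         if tabela[linha][1] == categoria and tabela[linha][4] == pais: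
--             soma = 1 + soma_medalhas(tabela, categoria, pais, linha - 1)
--         else:
--             soma = 0 + soma_medalhas(tabela, categoria, pais, linha - 1)
--     return soma
-- ===== SOURCE B (Python) =====
-- def soma_medalhas(tabela: list[list[str]], categoria: str, pais: str, linha: int) -> int:
--     soma = 0
--     for i in range(linha + 1):
--         if tabela[i][1] == categoria and tabela[i][4] == pais:
--             soma += 1
--     return soma
-- ===== Notes on version B (the rewrite author's own statement) =====
-- stated objective: idiomatic
-- what changed: Replaced the recursion on linha with an iterative accumulator loop over range(linha + 1).
import Mathlib
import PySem

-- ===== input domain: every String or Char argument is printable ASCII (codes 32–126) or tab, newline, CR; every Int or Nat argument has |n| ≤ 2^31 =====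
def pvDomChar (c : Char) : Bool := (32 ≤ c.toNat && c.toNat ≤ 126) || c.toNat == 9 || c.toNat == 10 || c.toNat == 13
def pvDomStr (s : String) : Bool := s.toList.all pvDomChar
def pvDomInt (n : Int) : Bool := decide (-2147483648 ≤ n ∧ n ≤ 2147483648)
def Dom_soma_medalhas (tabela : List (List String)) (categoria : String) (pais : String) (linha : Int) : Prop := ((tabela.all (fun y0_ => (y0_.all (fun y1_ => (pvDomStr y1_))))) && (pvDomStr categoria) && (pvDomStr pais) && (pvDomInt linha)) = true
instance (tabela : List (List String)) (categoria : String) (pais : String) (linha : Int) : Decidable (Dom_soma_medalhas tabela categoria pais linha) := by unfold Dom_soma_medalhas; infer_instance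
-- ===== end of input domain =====

-- B replaces A's recursion on linha by an iterative accumulator loop over range(linha+1) (idiomatic).

-- ===== PORT A =====
-- Literal port of A's recursion; the out-of-range indexing (an IndexError in Python) is
-- modelled by pyGetD defaults, and Pre_ excludes exactly those inputs.
def soma_medalhas (tabela : List (List String)) (categoria : String) (pais : String) (linha : Int) : Int :=
  if linha < 0 then 0
  else
    let row := PySem.List.pyGetD tabela linha []
    if PySem.List.pyGetD row 1 "" = categoria ∧ PySem.List.pyGetD row 4 "" = pais then
      1 + soma_medalhas tabela categoria pais (linha - 1)
    else
      0 + soma_medalhas tabela categoria pais (linha - 1)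
termination_by (linha + 1).toNat
decreasing_by all_goals omega

-- ===== PORT B =====
def soma_medalhas_alt (tabela : List (List String)) (categoria : String) (pais : String) (linha : Int) : Int :=
  (PySem.List.pyRange 0 (linha + 1) 1).foldl
    (fun soma i =>
      let row := PySem.List.pyGetD tabela i []
      if PySem.List.pyGetD row 1 "" = categoria ∧ PySem.List.pyGetD row 4 "" = pais then
        soma + 1
      else soma)
    0

-- ===== PRECONDITION & SPEC =====
-- Pre_ excludes exactly the inputs on which Python A raises IndexError: linha must be below
-- len(tabela); each visited row needs at least 2 columns, and at least 5 when its column 1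
-- matches categoria (the 'and' short-circuits, so column 4 is only read in that case).
def Pre_soma_medalhas (tabela : List (List String)) (categoria : String) (pais : String) (linha : Int) : Prop :=
  linha < (tabela.length : Int) ∧ ∀ i : Nat, i < (linha + 1).toNat →
    2 ≤ (tabela.getD i []).length ∧ ((tabela.getD i []).getD 1 "" = categoria → 5 ≤ (tabela.getD i []).length)
instance (tabela : List (List String)) (categoria : String) (pais : String) (linha : Int) : Decidable (Pre_soma_medalhas tabela categoria pais linha) := by unfold Pre_soma_medalhas; infer_instance

def pvWitness_soma_medalhas : List (List String) × String × String × Int :=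
  ([["", "1", "", "", "BRA"], ["", "1", "", "", "BRA"]], "1", "BRA", 1)

def Spec_soma_medalhas (tabela : List (List String)) (categoria : String) (pais : String) (linha : Int) (out : Int) : Prop := out = soma_medalhas_alt tabela categoria pais linha
instance (tabela : List (List String)) (categoria : String) (pais : String) (linha : Int) (out : Int) : Decidable (Spec_soma_medalhas tabela categoria pais linha out) := by unfold Spec_soma_medalhas; infer_instance

-- ===== CLAIM (what is proved, stated in full; the proofs are below) =====
def Claim_equal_soma_medalhas : Prop := ∀ (tabela : List (List String)) (categoria : String) (pais : String) (linha : Int), Dom_soma_medalhas tabela categoria pais linha → Pre_soma_medalhas tabela categoria pais linha → Spec_soma_medalhas tabela categoria pais linha (soma_medalhas tabela categoria pais linha)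

-- ===== LEMMAS AND PROOFS =====

-- The two ports agree on ALL inputs (the Pre_ hypothesis is about the Python programs, not needed here).
theorem soma_medalhas_eq_alt (tabela : List (List String)) (categoria : String) (pais : String) :
    ∀ (n : Nat) (linha : Int), (linha + 1).toNat = n →
      soma_medalhas tabela categoria pais linha = soma_medalhas_alt tabela categoria pais linha := by
  intro n
  induction n with
  | zero =>
    intro linha h
    have hneg : linha < 0 := by omega
    rw [soma_medalhas, soma_medalhas_alt, if_pos hneg,
        PySem.List.pyRange_one_eq_nil (by omega)]
    rfl
  | succ n ih =>
    intro linha h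
    have hpos : ¬ linha < 0 := by omega
    have hsplit : PySem.List.pyRange 0 (linha + 1) 1
        = PySem.List.pyRange 0 linha 1 ++ [linha] :=
      PySem.List.pyRange_one_succ_right (by omega)
    have hprev : soma_medalhas_alt tabela categoria pais (linha - 1)
        = (PySem.List.pyRange 0 linha 1).foldl
            (fun soma i =>
              let row := PySem.List.pyGetD tabela i []
              if PySem.List.pyGetD row 1 "" = categoria ∧ PySem.List.pyGetD row 4 "" = pais then
                soma + 1
              else soma) 0 := by
      unfold soma_medalhas_alt
      have h1 : linha - 1 + 1 = linha := by omega
      rw [h1]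
    rw [soma_medalhas, if_neg hpos, soma_medalhas_alt, hsplit, List.foldl_append,
        ih (linha - 1) (by omega), hprev]
    simp only [List.foldl_cons, List.foldl_nil]
    split_ifs with hc
    · omega
    · omega

theorem soma_medalhas_spec : Claim_equal_soma_medalhas := by
  intro tabela categoria pais linha _ _
  exact soma_medalhas_eq_alt tabela categoria pais (linha + 1).toNat linha rfl
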